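-- pv_equiv track=rewrite | github.com/Iambian/Escheron | tools/parser3.py | joinparams
-- ===== SOURCE A (Python) =====
-- from typing import NamedTuple, Iterator, Optional, Tuple
--
-- class Token(NamedTuple):
--     type: str
--     v: str
--     col: int
--     row: int
--     file: str
--
-- def joinparams(paramlist:list[list[Token]]):
--     tokenlist = []
--     for param in paramlist:
--         tokenlist.extend(param)
--         tokenlist.append(Token("COMMA",",",0,0,''))
--     if not tokenlist:
--         tokenlist = [None]  #Placeholder value for overwriting
--     tokenlist[-1] = Token("OPER",")",0,0,'')
--     return tokenlist
-- ===== SOURCE B (Python) =====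
-- from typing import NamedTuple
--
-- class Token(NamedTuple):
--     type: str
--     v: str
--     col: int
--     row: int
--     file: str
--
-- def joinparams(paramlist:list[list[Token]]):
--     # Recursive, back-to-front: the result for a list of params is the head
--     # param followed (with a COMMA separator when more params remain) by the
--     # result for the remaining params; the base case is the lone terminator.
--     if not paramlist:
--         return [Token("OPER",")",0,0,'')]
--     head, rest = paramlist[0], paramlist[1:]
--     tail = joinparams(rest)
--     if rest:
--         return list(head) + [Token("COMMA",",",0,0,'')] + tail
--     return list(head) + tail
-- ===== Notes on version B (the rewrite author's own statement) =====
-- stated objective: alternative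
-- what changed: Replaces A's single forward accumulator pass (append a COMMA after every param, patch the last slot via a [None] placeholder) by a structural recursion that builds the token list back-to-front: base case is the lone OPER terminator, and each step prepends the head param, with a COMMA only when further params remain.
import Mathlib
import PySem

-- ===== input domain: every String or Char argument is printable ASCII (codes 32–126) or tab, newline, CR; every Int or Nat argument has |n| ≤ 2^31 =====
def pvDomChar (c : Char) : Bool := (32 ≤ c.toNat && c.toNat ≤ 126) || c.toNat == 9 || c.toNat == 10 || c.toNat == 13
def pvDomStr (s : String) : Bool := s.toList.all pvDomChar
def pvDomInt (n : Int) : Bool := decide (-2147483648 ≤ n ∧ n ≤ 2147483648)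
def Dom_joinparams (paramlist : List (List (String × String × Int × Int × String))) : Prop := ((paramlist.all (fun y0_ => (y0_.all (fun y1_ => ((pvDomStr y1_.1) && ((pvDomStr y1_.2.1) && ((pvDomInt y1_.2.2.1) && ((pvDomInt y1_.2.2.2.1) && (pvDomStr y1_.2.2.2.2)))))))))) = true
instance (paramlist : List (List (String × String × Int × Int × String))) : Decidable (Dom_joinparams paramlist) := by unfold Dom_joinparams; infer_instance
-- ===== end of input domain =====

-- ===== PORT A =====
-- A: forward accumulator pass, a COMMA appended after every param; if empty use a [None]
-- placeholder; then overwrite the last slot with the OPER terminator.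
def joinparams (paramlist : List (List (String × String × Int × Int × String))) : List (String × String × Int × Int × String) :=
  let tokenlist := paramlist.foldl (fun acc param => acc ++ param ++ [("COMMA", ",", (0 : Int), (0 : Int), "")]) []
  -- Python: `if not tokenlist: tokenlist = [None]` then `tokenlist[-1] = OPER`:
  -- the placeholder is always overwritten, so the effect is replacing the last element (or the whole singleton).
  if tokenlist.isEmpty then [("OPER", ")", (0 : Int), (0 : Int), "")]
  else tokenlist.dropLast ++ [("OPER", ")", (0 : Int), (0 : Int), "")]

-- ===== PORT B =====
-- B: structural recursion, built back-to-front; base case is the lone terminator.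
def joinparams_alt (paramlist : List (List (String × String × Int × Int × String))) : List (String × String × Int × Int × String) :=
  match paramlist with
  | [] => [("OPER", ")", (0 : Int), (0 : Int), "")]
  | head :: rest =>
    let tail := joinparams_alt rest
    if rest.isEmpty then head ++ tail
    else head ++ [("COMMA", ",", (0 : Int), (0 : Int), "")] ++ tail

-- ===== PRECONDITION & SPEC =====
def Spec_joinparams (paramlist : List (List (String × String × Int × Int × String))) (out : List (String × String × Int × Int × String)) : Prop := out = joinparams_alt paramlist
instance (paramlist : List (List (String × String × Int × Int × String))) (out : List (String × String × Int × Int × String)) : Decidable (Spec_joinparams paramlist out) := by unfold Spec_joinparams; infer_instance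

-- ===== CLAIM (what is proved, stated in full; the proofs are below) =====
def Claim_equal_joinparams : Prop := ∀ (paramlist : List (List (String × String × Int × Int × String))), Dom_joinparams paramlist → Spec_joinparams paramlist (joinparams paramlist)

-- ===== LEMMAS AND PROOFS =====
def pvC : (String × String × Int × Int × String) := ("COMMA", ",", (0 : Int), (0 : Int), "")
def pvO : (String × String × Int × Int × String) := ("OPER", ")", (0 : Int), (0 : Int), "")

theorem foldlA_flat (l : List (List (String × String × Int × Int × String)))
    (acc : List (String × String × Int × Int × String)) :
    l.foldl (fun a p => a ++ p ++ [pvC]) acc = acc ++ l.flatMap (fun p => p ++ [pvC]) := by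
  induction l generalizing acc with
  | nil => simp
  | cons q r ih => rw [List.foldl_cons, ih, List.flatMap_cons]; simp

theorem drop_last_comma (l : List (List (String × String × Int × Int × String)))
    (x : List (String × String × Int × Int × String)) :
    (x ++ [pvC] ++ l.flatMap (fun p => p ++ [pvC])).dropLast
      = x ++ l.flatMap (fun p => pvC :: p) := by
  induction l generalizing x with
  | nil => simp
  | cons q r ih =>
    have h := ih (x ++ [pvC] ++ q)
    simp only [List.flatMap_cons]
    calc (x ++ [pvC] ++ (q ++ [pvC] ++ r.flatMap (fun p => p ++ [pvC]))).dropLast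
        = ((x ++ [pvC] ++ q) ++ [pvC] ++ r.flatMap (fun p => p ++ [pvC])).dropLast := by
          simp [List.append_assoc]
      _ = (x ++ [pvC] ++ q) ++ r.flatMap (fun p => pvC :: p) := h
      _ = x ++ (pvC :: q ++ r.flatMap (fun p => pvC :: p)) := by simp

theorem alt_flat (p : List (String × String × Int × Int × String))
    (rest : List (List (String × String × Int × Int × String))) :
    joinparams_alt (p :: rest) = p ++ rest.flatMap (fun q => pvC :: q) ++ [pvO] := by
  induction rest generalizing p with
  | nil => simp [joinparams_alt, pvO]
  | cons q r ih =>
    rw [joinparams_alt]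
    simp only [List.isEmpty_cons, if_false, Bool.false_eq_true, ih, List.flatMap_cons, pvC, pvO]
    simp

theorem joinparams_spec : Claim_equal_joinparams := by
  intro paramlist _
  unfold Spec_joinparams
  cases paramlist with
  | nil => simp [joinparams, joinparams_alt]
  | cons p rest =>
    rw [alt_flat]
    show (let tl := (p :: rest).foldl (fun a q => a ++ q ++ [pvC]) [];
      if tl.isEmpty then [pvO] else tl.dropLast ++ [pvO])
      = p ++ rest.flatMap (fun q => pvC :: q) ++ [pvO]
    have hA : (p :: rest).foldl (fun a q => a ++ q ++ [pvC]) []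
        = p ++ [pvC] ++ rest.flatMap (fun q => q ++ [pvC]) := by
      rw [List.foldl_cons, foldlA_flat]; simp
    rw [hA]
    have hne : ¬ (p ++ [pvC] ++ rest.flatMap (fun q => q ++ [pvC])).isEmpty := by simp
    simp only [hne, if_false, Bool.false_eq_true]
    rw [drop_last_comma]
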